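-- pv_equiv track=rewrite | github.com/thcborges/CompCEDERJ-FP | AD1/questao4.py | maior_menor
-- ===== SOURCE A (Python) =====
-- def maior_menor(vetor):
--     menor = None
--     maior = None
--     vetor.sort()
--     for i in range(len(vetor)):
--         if vetor.count(vetor[i]) == 1:
--             menor = vetor[i]
--             break
--     for j in range(len(vetor)-1, -1, -1):
--         if vetor.count(vetor[j]) == 1:
--             maior = vetor[j]
--             break
--     return menor, maior
-- ===== SOURCE B (Python) =====
-- def maior_menor(vetor):
--     vetor.sort()
--     counts = {}
--     for v in vetor:
--         counts[v] = counts.get(v, 0) + 1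
--     unicos = [v for v in vetor if counts[v] == 1]
--     if unicos:
--         return unicos[0], unicos[-1]
--     return None, None
-- ===== Notes on version B (the rewrite author's own statement) =====
-- stated objective: faster
-- what changed: Replaces the two O(n^2) loops that re-scan the list with count() at every index by one counting dict built in a single pass plus one filter pass picking the first and last unique element.
import Mathlib
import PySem

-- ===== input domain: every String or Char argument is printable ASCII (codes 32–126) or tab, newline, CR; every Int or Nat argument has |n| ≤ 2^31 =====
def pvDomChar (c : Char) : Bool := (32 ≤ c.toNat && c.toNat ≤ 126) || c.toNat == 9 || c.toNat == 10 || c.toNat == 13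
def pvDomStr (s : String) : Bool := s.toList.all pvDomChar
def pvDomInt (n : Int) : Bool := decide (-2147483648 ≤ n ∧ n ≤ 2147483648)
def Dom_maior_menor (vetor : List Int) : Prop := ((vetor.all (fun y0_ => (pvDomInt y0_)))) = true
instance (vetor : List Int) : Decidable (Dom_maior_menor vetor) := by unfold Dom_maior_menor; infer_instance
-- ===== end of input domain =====

-- B replaces A's two quadratic count()-per-index loops by a counting dict built once and a
-- single filter pass (objective: faster). Both A and B sort the argument in place in Python;
-- the equivalence proved here is about the RETURN value only.

-- ===== PORT A =====
-- the body both of A's loops runs at each index: first index whose element occurs exactly once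
def maior_menor_loop (s : List Int) : List Int → Option Int
  | [] => none
  | i :: rest =>
      let v := PySem.List.pyGetD s i 0
      if s.count v == 1 then some v else maior_menor_loop s rest

def maior_menor (vetor : List Int) : Option Int × Option Int :=
  let s := PySem.List.sorted vetor (fun x => x) false
  let menor := maior_menor_loop s (PySem.List.pyRange 0 s.length 1)
  let maior := maior_menor_loop s (PySem.List.pyRange ((s.length : Int) - 1) (-1) (-1))
  (menor, maior)

-- ===== PORT B =====
def maior_menor_alt (vetor : List Int) : Option Int × Option Int :=
  let s := PySem.List.sorted vetor (fun x => x) false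
  let counts := s.foldl (fun d v => d.insert v (d.getD v 0 + 1)) (PySem.Dict.empty : PySem.Dict Int Int)
  let unicos := s.filter (fun v => counts.getD v 0 == 1)
  if unicos.isEmpty then (none, none) else (unicos.head?, unicos.getLast?)

-- ===== PRECONDITION & SPEC =====
def Spec_maior_menor (vetor : List Int) (out : Option Int × Option Int) : Prop := out = maior_menor_alt vetor
instance (vetor : List Int) (out : Option Int × Option Int) : Decidable (Spec_maior_menor vetor out) := by unfold Spec_maior_menor; infer_instance

-- ===== CLAIM (what is proved, stated in full; the proofs are below) =====
def Claim_equal_maior_menor : Prop := ∀ (vetor : List Int), Dom_maior_menor vetor → Spec_maior_menor vetor (maior_menor vetor)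

-- ===== LEMMAS AND PROOFS =====

-- A's break-loop over a list of indices returns the head of the filtered image of those indices
theorem maior_menor_loop_eq (s : List Int) (idxs : List Int) :
    maior_menor_loop s idxs
      = ((idxs.map (fun i => PySem.List.pyGetD s i 0)).filter
            (fun v => s.count v == 1)).head? := by
  induction idxs with
  | nil => rfl
  | cons i rest ih =>
      simp only [maior_menor_loop, List.map_cons, List.filter_cons]
      by_cases h : s.count (PySem.List.pyGetD s i 0) == 1
      · simp [h]
      · simp [h, ih]

theorem maior_menor_spec : Claim_equal_maior_menor := by
  intro vetor _
  unfold Spec_maior_menor maior_menor maior_menor_alt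
  set s := PySem.List.sorted vetor (fun x => x) false with hs
  -- B's dict counts are exactly count over s (via PySem.Dict.getD_foldl_insert_add_one)
  have hfilter :
      s.filter (fun v => (s.foldl (fun d v => d.insert v (d.getD v 0 + 1)) (PySem.Dict.empty : PySem.Dict Int Int)).getD v 0 == 1)
        = s.filter (fun v => s.count v == 1) := by
    apply List.filter_congr
    intro v _
    rw [PySem.Dict.getD_foldl_insert_add_one]
    simp only [PySem.Dict.getD_empty, zero_add]
    by_cases h : s.count v = 1 <;> simp [h]
  -- A's forward loop = head? of the filtered sorted list
  have hfwd : maior_menor_loop s (PySem.List.pyRange 0 s.length 1)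
      = (s.filter (fun v => s.count v == 1)).head? := by
    rw [maior_menor_loop_eq]
    congr 1
    congr 1
    simpa using PySem.List.map_pyGetD_pyRange_zero' s 0
  -- A's backward loop = getLast? of the filtered sorted list
  have hbwd : maior_menor_loop s (PySem.List.pyRange ((s.length : Int) - 1) (-1) (-1))
      = (s.filter (fun v => s.count v == 1)).getLast? := by
    rw [maior_menor_loop_eq]
    rw [PySem.List.pyRange_neg_one_eq_reverse]
    have : ((-1 : Int) + 1) = 0 := by norm_num
    rw [this]
    have h2 : ((s.length : Int) - 1 + 1) = (s.length : Int) := by ring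
    rw [h2]
    rw [List.map_reverse, List.filter_reverse, List.head?_reverse]
    congr 2
    simpa using PySem.List.map_pyGetD_pyRange_zero' s 0
  simp only [hfwd, hbwd, hfilter]
  by_cases he : (s.filter (fun v => s.count v == 1)).isEmpty
  · rw [List.isEmpty_iff] at he
    simp [he]
  · simp [he]
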